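-- pv_equiv track=rewrite | github.com/ohken322/opt100 | 5_Max_Clique/tabu_search.py | evaluate
-- ===== SOURCE A (Python) =====
-- def evaluate(nodes, adj, sol) -> tuple:
--     """解を評価する
--
--     Parameters
--     ----------
--     nodes : list
--         ノード集合
--     adj : dict
--         各ノードの隣接ノード集合
--     sol : set
--         解 (頂点集合の部分集合)
--
--     Returns
--     -------
--     card : int
--         解の位数
--     infeas : int
--         制約違反度合い (存在する辺の数)
--     b : list
--         元のグラフの各頂点に対する，解の中で隣接する頂点の数
--     """
--     card = len(sol) # 位数
--     b = [0 for i in nodes]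
--     infeas = 0 # 制約違反度合い (存在する辺の数)
--     for i in sol:
--         for j in adj[i]:
--             b[j] += 1
--             if j in sol:
--                 infeas += 1
--     assert infeas%2==0
--     return card, infeas//2, b
-- ===== SOURCE B (Python) =====
-- def evaluate(nodes, adj, sol) -> tuple:
--     """Evaluate a clique solution: populate the neighbour-count array b in one
--     flat pass (no membership test), then derive the doubled violation count as
--     a reduction of b over sol."""
--     card = len(sol)
--     b = [0] * len(nodes)
--     for i in sol:
--         for j in adj[i]:
--             b[j] += 1
--     s = sum(b[i] for i in sol)
--     assert s % 2 == 0
--     return card, s // 2, b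
-- ===== Notes on version B (the rewrite author's own statement) =====
-- stated objective: simpler
-- what changed: A's fused inner loop that both increments b[j] and tests 'j in sol' to accumulate infeas is split into a plain populate pass over the adjacency lists (no membership test inside) followed by a separate reduction s = sum(b[i] for i in sol), which equals A's doubled infeas; the assert is kept on the same quantity.
-- outside the precondition, e.g. on evaluate([0, 1], {-1: [1]}, {-1}): A returns (1, 0, [0, 1]), B raises AssertionError; on evaluate([0, 1], {-1: [1], 1: [1]}, {1, -1}): A returns (2, 1, [0, 2]), B returns (2, 2, [0, 2])
import Mathlib
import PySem

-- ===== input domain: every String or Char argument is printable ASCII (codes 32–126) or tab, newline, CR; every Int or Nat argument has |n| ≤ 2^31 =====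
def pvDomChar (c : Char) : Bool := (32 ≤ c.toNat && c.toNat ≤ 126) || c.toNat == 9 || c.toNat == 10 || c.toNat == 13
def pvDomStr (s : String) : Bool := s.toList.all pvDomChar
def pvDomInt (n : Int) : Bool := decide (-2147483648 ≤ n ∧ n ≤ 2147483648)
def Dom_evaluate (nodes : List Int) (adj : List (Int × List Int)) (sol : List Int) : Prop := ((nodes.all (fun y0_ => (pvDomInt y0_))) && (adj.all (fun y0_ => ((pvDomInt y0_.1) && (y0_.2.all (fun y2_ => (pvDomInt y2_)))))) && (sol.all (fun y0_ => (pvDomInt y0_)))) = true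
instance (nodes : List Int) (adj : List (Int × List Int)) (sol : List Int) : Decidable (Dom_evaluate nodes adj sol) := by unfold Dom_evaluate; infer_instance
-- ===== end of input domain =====

-- B splits A's fused count-and-test inner loop into a populate pass plus a reduction over sol (objective: simpler).

-- ===== PORT A =====
-- adj[i] (dict lookup, first match); total form — Pre_ requires the key to be present
def pvAdjGet (adj : List (Int × List Int)) (i : Int) : List Int :=
  (PySem.Dict.mk adj).getD i []

-- 'b[j] += 1' (Python list read+write; total form — Pre_ keeps j in range)
def pvBump (b : List Int) (j : Int) : List Int :=
  PySem.List.pySetD b j (PySem.List.pyGetD b j 0 + 1)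

def evaluate (nodes : List Int) (adj : List (Int × List Int)) (sol : List Int) : Int × Int × List Int :=
  let card : Int := sol.length
  let b0 : List Int := nodes.map (fun _ => (0 : Int))
  let st : List Int × Int := sol.foldl (fun st i =>
      (pvAdjGet adj i).foldl (fun st j =>
        (pvBump st.1 j, if j ∈ sol then st.2 + 1 else st.2)) st) (b0, 0)
  (card, PySem.Int.floordiv st.2 2, st.1)

-- ===== PORT B =====
def evaluate_alt (nodes : List Int) (adj : List (Int × List Int)) (sol : List Int) : Int × Int × List Int :=
  let card : Int := sol.length
  let b : List Int := sol.foldl (fun b i => (pvAdjGet adj i).foldl pvBump b)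
      (List.replicate nodes.length (0 : Int))
  let s : Int := sol.foldl (fun acc i => acc + PySem.List.pyGetD b i 0) 0
  (card, PySem.Int.floordiv s 2, b)

-- ===== PRECONDITION & SPEC =====
-- Pre_ excludes: inputs where A raises (a sol member missing from adj, a neighbour index out of
-- range, an odd pair count failing the assert); and — stated narrowing — solutions or neighbour
-- lists with indices outside range(len(nodes)) (A's negative-index wraparound into b is accidental
-- and B's reduction may then fail its assert) and sol with duplicates (sol is documented as a set,
-- so its List model holds distinct elements; on a duplicated list A and B count differently).
def Pre_evaluate (nodes : List Int) (adj : List (Int × List Int)) (sol : List Int) : Prop :=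
  sol.Nodup ∧
  (∀ i ∈ sol, 0 ≤ i ∧ i < nodes.length) ∧
  (∀ i ∈ sol, ((PySem.Dict.mk adj).get? i).isSome = true ∧
    ∀ j ∈ (PySem.Dict.mk adj).getD i [], 0 ≤ j ∧ j < nodes.length) ∧
  2 ∣ (sol.flatMap (fun i => ((PySem.Dict.mk adj).getD i []).filter (fun j => decide (j ∈ sol)))).length
instance (nodes : List Int) (adj : List (Int × List Int)) (sol : List Int) : Decidable (Pre_evaluate nodes adj sol) := by unfold Pre_evaluate; infer_instance

def pvWitness_evaluate : List Int × (List (Int × List Int)) × List Int :=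
  ([0, 1], [(0, [1]), (1, [0])], [0, 1])

def Spec_evaluate (nodes : List Int) (adj : List (Int × List Int)) (sol : List Int) (out : Int × Int × List Int) : Prop := out = evaluate_alt nodes adj sol
instance (nodes : List Int) (adj : List (Int × List Int)) (sol : List Int) (out : Int × Int × List Int) : Decidable (Spec_evaluate nodes adj sol out) := by unfold Spec_evaluate; infer_instance

-- ===== CLAIM (what is proved, stated in full; the proofs are below) =====
def Claim_equal_evaluate : Prop := ∀ (nodes : List Int) (adj : List (Int × List Int)) (sol : List Int), Dom_evaluate nodes adj sol → Pre_evaluate nodes adj sol → Spec_evaluate nodes adj sol (evaluate nodes adj sol)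

-- ===== LEMMAS AND PROOFS =====

-- inner fused loop of A = populate fold + membership count
theorem innerA (sol js : List Int) (b : List Int) (c : Int) :
    js.foldl (fun st j => (pvBump st.1 j, if j ∈ sol then st.2 + 1 else st.2)) (b, c)
      = (js.foldl pvBump b, c + (js.countP (fun j => decide (j ∈ sol)) : Int)) := by
  induction js generalizing b c with
  | nil => simp
  | cons x t ih =>
    simp only [List.foldl_cons, List.countP_cons, ih]
    by_cases h : x ∈ sol <;> simp [h] <;> push_cast <;> ring

-- outer fused loop of A
theorem outerA (adj : List (Int × List Int)) (sol ss : List Int) (b : List Int) (c : Int) :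
    ss.foldl (fun st i =>
        (pvAdjGet adj i).foldl (fun st j =>
          (pvBump st.1 j, if j ∈ sol then st.2 + 1 else st.2)) st) (b, c)
      = (ss.foldl (fun b i => (pvAdjGet adj i).foldl pvBump b) b,
         c + ((ss.flatMap (fun i => pvAdjGet adj i)).countP (fun j => decide (j ∈ sol)) : Int)) := by
  induction ss generalizing b c with
  | nil => simp
  | cons x t ih =>
    simp only [List.foldl_cons, List.flatMap_cons, List.countP_append, innerA, ih]
    push_cast; ring_nf

theorem pvBump_length (b : List Int) (j : Int) : (pvBump b j).length = b.length := by
  simp [pvBump, PySem.List.length_pySetD]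

theorem pyGetD_bump (b : List Int) (j v : Int) (hj : 0 ≤ j ∧ j < (b.length : Int))
    (hv : 0 ≤ v ∧ v < (b.length : Int)) :
    PySem.List.pyGetD (pvBump b j) v 0
      = PySem.List.pyGetD b v 0 + (if j = v then 1 else 0) := by
  unfold pvBump
  rw [PySem.List.pySetD_of_nonneg b _ hj.1]
  rw [PySem.List.pyGetD_eq_getElem _ 0 hv.1 (by simpa using hv.2)]
  rw [PySem.List.pyGetD_eq_getElem b 0 hv.1 hv.2, PySem.List.pyGetD_eq_getElem b 0 hj.1 hj.2]
  rw [List.getElem_set]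
  rcases eq_or_ne j v with h | h
  · have : j.toNat = v.toNat := by omega
    simp [this, h]
  · have hne : j.toNat ≠ v.toNat := by omega
    simp [hne, h]

-- final b entry = occurrence count among the processed neighbours
theorem count_bump (js : List Int) (b : List Int) (v : Int)
    (hjs : ∀ j ∈ js, 0 ≤ j ∧ j < (b.length : Int)) (hv : 0 ≤ v ∧ v < (b.length : Int)) :
    PySem.List.pyGetD (js.foldl pvBump b) v 0
      = PySem.List.pyGetD b v 0 + (js.count v : Int) := by
  induction js generalizing b with
  | nil => simp
  | cons x t ih =>
    have hx := hjs x List.mem_cons_self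
    have ht : ∀ j ∈ t, 0 ≤ j ∧ j < ((pvBump b x).length : Int) := by
      intro j hjm; rw [pvBump_length]; exact hjs j (List.mem_cons_of_mem _ hjm)
    have hv' : 0 ≤ v ∧ v < ((pvBump b x).length : Int) := by rw [pvBump_length]; exact hv
    simp only [List.foldl_cons]
    rw [ih (pvBump b x) ht hv', pyGetD_bump b x v hx hv, List.count_cons]
    push_cast
    simp only [beq_iff_eq]
    rcases eq_or_ne x v with h | h
    · subst h; simp only [if_pos rfl]; ring
    · simp [h, Ne.symm h]

-- Σ_{i ∈ sol} (if i = x then 1 else 0) = [x ∈ sol] for duplicate-free sol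
theorem sum_indicator (sol : List Int) (x : Int) (hnd : sol.Nodup) :
    (sol.map (fun i => if i = x then (1 : Int) else 0)).sum
      = (if x ∈ sol then 1 else 0) := by
  induction sol with
  | nil => simp
  | cons a t ih =>
    have hnd' := List.nodup_cons.mp hnd
    rcases eq_or_ne a x with h | h
    · subst h
      simp [List.map_cons, ih hnd'.2, hnd'.1]
    · simp [List.map_cons, ih hnd'.2, h, Ne.symm h, List.mem_cons]

-- Σ_{i ∈ sol} count i t = number of members of t lying in sol (sol duplicate-free)
theorem sum_count (sol t : List Int) (hnd : sol.Nodup) :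
    (sol.map (fun i => (t.count i : Int))).sum
      = (t.countP (fun j => decide (j ∈ sol)) : Int) := by
  induction t with
  | nil => simp
  | cons x r ih =>
    have hmap : (sol.map (fun i => ((x :: r).count i : Int))).sum
        = (sol.map (fun i => ((r.count i : Int)) + (if i = x then (1 : Int) else 0))).sum := by
      apply congrArg List.sum
      apply List.map_congr_left
      intro i _
      rw [List.count_cons]
      push_cast
      rcases eq_or_ne i x with h | h
      · subst h; simp
      · simp [h, Ne.symm h]
    rw [hmap, List.sum_map_add, sum_indicator sol x hnd, ih, List.countP_cons]
    by_cases h : x ∈ sol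
    · simp only [h, decide_true, if_pos]; push_cast; ring
    · simp [h]

-- the nested populate loop flattens to a single fold over all neighbour lists
theorem popFlat (adj : List (Int × List Int)) (ss : List Int) (b : List Int) :
    ss.foldl (fun b i => (pvAdjGet adj i).foldl pvBump b) b
      = (ss.flatMap (fun i => pvAdjGet adj i)).foldl pvBump b := by
  induction ss generalizing b with
  | nil => rfl
  | cons x t ih => simp [List.foldl_cons, List.flatMap_cons, List.foldl_append, ih]

theorem pyGetD_replicate_zero (n : Nat) (i : Int) (h0 : 0 ≤ i) (h1 : i < (n : Int)) :
    PySem.List.pyGetD (List.replicate n (0 : Int)) i 0 = 0 := by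
  rw [PySem.List.pyGetD_eq_getElem _ 0 h0 (by simpa using h1)]
  simp

-- ===== VERDICT (by name: the statement is the Claim_ definition above) =====
theorem evaluate_spec : Claim_equal_evaluate := by
  intro nodes adj sol _ hpre
  obtain ⟨hnd, hsol, hadj, _⟩ := hpre
  unfold Spec_evaluate evaluate evaluate_alt
  simp only
  have hb0 : nodes.map (fun _ => (0 : Int)) = List.replicate nodes.length 0 := by
    simp [List.eq_replicate_iff]
  rw [outerA, hb0]
  set A : List Int := sol.flatMap (fun i => pvAdjGet adj i) with hA
  rw [popFlat adj sol (List.replicate nodes.length 0)]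
  have hAmem : ∀ j ∈ A, 0 ≤ j ∧ j < (nodes.length : Int) := by
    intro j hjm
    rw [hA, List.mem_flatMap] at hjm
    obtain ⟨i, hi, hji⟩ := hjm
    exact (hadj i hi).2 j hji
  have hval : ∀ i ∈ sol,
      PySem.List.pyGetD (A.foldl pvBump (List.replicate nodes.length 0)) i 0 = (A.count i : Int) := by
    intro i hi
    have hi' := hsol i hi
    rw [count_bump A _ i (by simpa using hAmem) (by simpa using hi'),
        pyGetD_replicate_zero nodes.length i hi'.1 hi'.2, zero_add]
  have hs : sol.foldl (fun acc i =>
        acc + PySem.List.pyGetD (A.foldl pvBump (List.replicate nodes.length 0)) i 0) 0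
      = (A.countP (fun j => decide (j ∈ sol)) : Int) := by
    rw [PySem.List.foldl_add]
    rw [List.map_congr_left hval, sum_count sol A hnd]
    simp
  rw [hs]
  simp
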